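-- pv_equiv track=rewrite | github.com/Ignotus6043/MedAssistant-v0 | app_deprecated.py | _parse_option_mapping
-- ===== SOURCE A (Python) =====
-- OPTION_PREFIXES = ["A.", "B.", "C.", "D.", "E.", "F.", "G.", "H."]
--
-- def _parse_option_mapping(assistant_text: str) -> dict:
--     mapping = {}
--     if not assistant_text:
--         return mapping
--     for line in str(assistant_text).split("\n"):
--         line = line.strip()
--         for i, p in enumerate(OPTION_PREFIXES):
--             if line.startswith(p):
--                 key = chr(ord('A') + i)
--                 mapping[key] = line[len(p):].strip()
--                 break
--     return mapping
-- ===== SOURCE B (Python) =====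
-- def _parse_option_mapping(assistant_text: str) -> dict:
--     mapping = {}
--     for raw in str(assistant_text).split("\n"):
--         line = raw.strip()
--         if len(line) >= 2 and 'A' <= line[0] <= 'H' and line[1] == '.':
--             mapping[line[0]] = line[2:].strip()
--     return mapping
-- ===== Notes on version B (the rewrite author's own statement) =====
-- stated objective: simpler
-- what changed: Drops the inner scan over the 8-element OPTION_PREFIXES list (with enumerate/chr/break) and recognises an option line directly by a character-range test on its first two characters; the empty-input guard disappears because the test is vacuous on empty lines.
import Mathlib
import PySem

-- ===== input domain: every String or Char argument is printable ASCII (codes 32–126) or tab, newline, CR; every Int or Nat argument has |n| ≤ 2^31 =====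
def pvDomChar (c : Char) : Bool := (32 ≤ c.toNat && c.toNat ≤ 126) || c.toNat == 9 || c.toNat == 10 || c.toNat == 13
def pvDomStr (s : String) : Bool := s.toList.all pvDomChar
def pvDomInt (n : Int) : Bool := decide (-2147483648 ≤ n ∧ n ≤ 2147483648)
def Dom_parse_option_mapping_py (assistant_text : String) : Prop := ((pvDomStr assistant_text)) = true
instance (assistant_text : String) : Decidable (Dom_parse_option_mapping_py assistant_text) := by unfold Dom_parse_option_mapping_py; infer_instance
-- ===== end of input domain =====

-- B replaces A's inner scan over the 8 prefixes by a direct character-range test per line (simpler).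

-- ===== PORT A =====
def OPTION_PREFIXES : List String := ["A.", "B.", "C.", "D.", "E.", "F.", "G.", "H."]

-- the inner 'for i, p in enumerate(OPTION_PREFIXES): if line.startswith(p): …; break'
def pomInnerA (line : String) : List (Int × String) → PySem.Dict String String → PySem.Dict String String
  | [], d => d
  | (i, p) :: rest, d =>
    if PySem.Str.startswith line p then
      d.insert (String.ofList [Char.ofNat ('A'.toNat + i.toNat)])
        (PySem.Str.strip (PySem.Str.slice line (some (PySem.Str.len p : Int)) none))
    else pomInnerA line rest d

def parse_option_mapping_py (assistant_text : String) : List (String × String) :=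
  if assistant_text = "" then []
  else
    ((((PySem.Str.split? assistant_text "\n").getD [])).foldl
      (fun d raw => pomInnerA (PySem.Str.strip raw) (PySem.List.enumerate OPTION_PREFIXES) d)
      PySem.Dict.empty).items

-- ===== PORT B =====
-- 'if len(line) >= 2 and 'A' <= line[0] <= 'H' and line[1] == '.': mapping[line[0]] = line[2:].strip()'
def pomStepB (d : PySem.Dict String String) (raw : String) : PySem.Dict String String :=
  let line := PySem.Str.strip raw
  match line.toList with
  | c0 :: c1 :: _ =>
    if ('A' ≤ c0 ∧ c0 ≤ 'H') ∧ c1 = '.' then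
      d.insert (String.ofList [c0]) (PySem.Str.strip (PySem.Str.slice line (some 2) none))
    else d
  | _ => d

def parse_option_mapping_py_alt (assistant_text : String) : List (String × String) :=
  ((((PySem.Str.split? assistant_text "\n").getD [])).foldl pomStepB PySem.Dict.empty).items

-- ===== PRECONDITION & SPEC =====
def Spec_parse_option_mapping_py (assistant_text : String) (out : List (String × String)) : Prop := out = parse_option_mapping_py_alt assistant_text
instance (assistant_text : String) (out : List (String × String)) : Decidable (Spec_parse_option_mapping_py assistant_text out) := by unfold Spec_parse_option_mapping_py; infer_instance

-- ===== CLAIM (what is proved, stated in full; the proofs are below) =====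
def Claim_equal_parse_option_mapping_py : Prop := ∀ (assistant_text : String), Dom_parse_option_mapping_py assistant_text → Spec_parse_option_mapping_py assistant_text (parse_option_mapping_py assistant_text)

-- ===== LEMMAS AND PROOFS =====

-- Char comparisons as Nat comparisons of code points
theorem pvCharNatLe (a b : Char) : (a ≤ b) ↔ (a.toNat ≤ b.toNat) := Iff.rfl

theorem pvCharNatEq (a b : Char) : a = b ↔ a.toNat = b.toNat := eq_iff_eq_of_cmp_eq_cmp rfl

-- a char in 'A'..'H' is one of the eight letters
theorem pvCharRange (c : Char) (h1 : 'A' ≤ c) (h2 : c ≤ 'H') (e1 : ¬ c = 'A') (e2 : ¬ c = 'B')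
    (e3 : ¬ c = 'C') (e4 : ¬ c = 'D') (e5 : ¬ c = 'E') (e6 : ¬ c = 'F') (e7 : ¬ c = 'G')
    (e8 : ¬ c = 'H') : False := by
  rw [pvCharNatLe] at h1 h2
  rw [pvCharNatEq] at e1 e2 e3 e4 e5 e6 e7 e8
  simp only [show 'A'.toNat = 65 from rfl, show 'B'.toNat = 66 from rfl, show 'C'.toNat = 67 from rfl,
    show 'D'.toNat = 68 from rfl, show 'E'.toNat = 69 from rfl, show 'F'.toNat = 70 from rfl,
    show 'G'.toNat = 71 from rfl, show 'H'.toNat = 72 from rfl] at *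
  omega

-- per line, A's scan over the 8 prefixes equals B's direct test
lemma pomInner_eq_step (raw : String) (d : PySem.Dict String String) :
    pomInnerA (PySem.Str.strip raw) (PySem.List.enumerate OPTION_PREFIXES) d = pomStepB d raw := by
  unfold pomStepB
  have henum : PySem.List.enumerate OPTION_PREFIXES =
      [((0:Int),"A."),(1,"B."),(2,"C."),(3,"D."),(4,"E."),(5,"F."),(6,"G."),(7,"H.")] := by decide
  rw [henum]
  rcases h : (PySem.Str.strip raw).toList with _ | ⟨c0, _ | ⟨c1, rest⟩⟩ <;>
    simp only [pomInnerA, PySem.Str.startswith_eq, h, PySem.Chars.startswith_iff] <;>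
    simp [List.cons_prefix_cons]
  by_cases hdot : c1 = '.'
  · subst hdot
    by_cases e1 : c0 = 'A'
    · subst e1; simp
    by_cases e2 : c0 = 'B'
    · subst e2; simp
    by_cases e3 : c0 = 'C'
    · subst e3; simp
    by_cases e4 : c0 = 'D'
    · subst e4; simp
    by_cases e5 : c0 = 'E'
    · subst e5; simp
    by_cases e6 : c0 = 'F'
    · subst e6; simp
    by_cases e7 : c0 = 'G'
    · subst e7; simp
    by_cases e8 : c0 = 'H'
    · subst e8; simp
    have hrange : ¬ ('A' ≤ c0 ∧ c0 ≤ 'H') := fun ⟨h1, h2⟩ =>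
      pvCharRange c0 h1 h2 e1 e2 e3 e4 e5 e6 e7 e8
    simp [eq_comm, e1, e2, e3, e4, e5, e6, e7, e8, hrange]
  · simp [eq_comm, hdot]

-- ===== VERDICT (by name: the statement is the Claim_ definition above) =====
theorem parse_option_mapping_py_spec : Claim_equal_parse_option_mapping_py := by
  intro s _
  unfold Spec_parse_option_mapping_py parse_option_mapping_py parse_option_mapping_py_alt
  by_cases hs : s = ""
  · subst hs; decide
  · simp only [hs, if_false, pomInner_eq_step]
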